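-- pv_equiv track=rewrite | github.com/nazirite96/pythonStudy | level_primary/배열_만들기_2.py | solution
-- ===== SOURCE A (Python) =====
-- def solution(l, r):
--     answer = []
--     for k in range(1,128):
--         s = int(bin(k)[2:])
--         if l <= s*5 <= r:
--             answer.append(s*5)
--     if len(answer) == 0:
--         return [-1]
--     return answer
-- ===== SOURCE B (Python) =====
-- def solution(l, r):
--     # Generate the digit-0/5 candidates directly, level by decimal length (1..7 digits),
--     # instead of decoding binary representations of 1..127.
--     cands = []
--     level = [5]
--     for _ in range(7):
--         cands += level
--         level = [c for n in level for c in (n * 10, n * 10 + 5)]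
--     answer = [x for x in cands if l <= x <= r]
--     return answer if answer else [-1]
-- ===== Notes on version B (the rewrite author's own statement) =====
-- stated objective: alternative
-- what changed: B generates the 127 digit-0/5 candidates directly level-by-level (append digit 0 or 5 for 1..7 decimal digits) and filters them, instead of converting each k in 1..127 to its binary string, re-reading it as a decimal int and multiplying by 5.
import Mathlib
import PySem

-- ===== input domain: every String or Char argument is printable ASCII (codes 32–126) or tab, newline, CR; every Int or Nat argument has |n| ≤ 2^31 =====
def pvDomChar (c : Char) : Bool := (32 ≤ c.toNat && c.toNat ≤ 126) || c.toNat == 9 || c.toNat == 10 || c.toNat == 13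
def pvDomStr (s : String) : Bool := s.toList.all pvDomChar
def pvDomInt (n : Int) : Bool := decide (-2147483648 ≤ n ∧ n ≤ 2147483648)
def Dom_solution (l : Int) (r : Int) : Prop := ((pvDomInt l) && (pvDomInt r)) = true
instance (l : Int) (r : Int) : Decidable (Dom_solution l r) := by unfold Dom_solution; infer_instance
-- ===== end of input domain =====

-- B replaces A's per-k binary-string decoding with direct level-by-level generation of the
-- digit-0/5 candidates (objective: alternative, same cost).

-- ===== PORT A =====
-- bin(k)[2:] as a list of chars; exact for k ≥ 1 (A only calls it with 1 ≤ k ≤ 127)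
def binCharsAux : Nat → Nat → List Char
  | _, 0 => []
  | 0, _+1 => []     -- unreachable: fuel = initial n suffices
  | fuel+1, n+1 => binCharsAux fuel ((n+1)/2) ++ [if (n+1) % 2 == 1 then '1' else '0']

def binChars (n : Nat) : List Char := binCharsAux n n

def solution (l : Int) (r : Int) : List Int :=
  let answer := (PySem.List.pyRange 1 128 1).foldl (fun answer k =>
    let s : Int := (PySem.Int.ofChars? (binChars k.toNat)).getD 0   -- int(bin(k)[2:]); never none for k ≥ 1
    if l ≤ s*5 ∧ s*5 ≤ r then answer ++ [s*5] else answer) []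
  if answer.length == 0 then [-1] else answer

-- ===== PORT B =====
def solution_alt (l : Int) (r : Int) : List Int :=
  let st := (List.range 7).foldl (fun (st : List Int × List Int) _ =>
      (st.1 ++ st.2, st.2.flatMap (fun n => [n*10, n*10+5]))) ([], [5])
  let answer := st.1.filter (fun x => decide (l ≤ x ∧ x ≤ r))
  if answer.isEmpty then [-1] else answer

-- ===== PRECONDITION & SPEC =====
def Spec_solution (l : Int) (r : Int) (out : List Int) : Prop := out = solution_alt l r
instance (l : Int) (r : Int) (out : List Int) : Decidable (Spec_solution l r out) := by unfold Spec_solution; infer_instance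

-- ===== CLAIM (what is proved, stated in full; the proofs are below) =====
def Claim_equal_solution : Prop := ∀ (l : Int) (r : Int), Dom_solution l r → Spec_solution l r (solution l r)

-- ===== LEMMAS AND PROOFS =====

-- A's append-if loop is a filter of the mapped candidate list
theorem foldl_append_if_map (f : Int → Int) (p : Int → Prop) [DecidablePred p] :
    ∀ (xs : List Int) (acc : List Int),
      List.foldl (fun acc k => if p (f k) then acc ++ [f k] else acc) acc xs
        = acc ++ (xs.map f).filter (fun x => decide (p x)) := by
  intro xs
  induction xs with
  | nil => simp
  | cons y ys ih =>
    intro acc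
    simp only [List.foldl_cons, List.map_cons, List.filter_cons]
    by_cases h : p (f y) <;> simp [h, ih]

-- the two candidate lists coincide (both are closed terms)
theorem cands_eq :
    (PySem.List.pyRange 1 128 1).map
        (fun k => ((PySem.Int.ofChars? (binChars k.toNat)).getD 0) * 5)
      = ((List.range 7).foldl (fun (st : List Int × List Int) _ =>
          (st.1 ++ st.2, st.2.flatMap (fun n => [n*10, n*10+5]))) ([], [5])).1 := by
  decide

-- ===== VERDICT (by name: the statement is the Claim_ definition above) =====
theorem solution_spec : Claim_equal_solution := by
  intro l r _
  unfold Spec_solution solution solution_alt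
  rw [foldl_append_if_map (fun k => ((PySem.Int.ofChars? (binChars k.toNat)).getD 0) * 5)
        (fun x => l ≤ x ∧ x ≤ r), cands_eq]
  simp
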